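-- pv_equiv track=rewrite | github.com/Ublyudok-kun/reversi | deshacerJugadas.py | deshacer_abajo
-- ===== SOURCE A (Python) =====
-- def deshacer_abajo(tablero, x, y, xf, yf, turno, dimension):
--     if (x >= 0 and x < dimension):
--         try:
--             # abajo
--             if ((y == yf) and (xf-1 > x)):
--                 tablero[x+1][y] = turno*-1
--                 deshacer_abajo(tablero, x+1, y, xf, yf, turno, dimension)
--             else:
--                 return tablero
--         except:
--             IndexError
--     return tablero
-- ===== SOURCE B (Python) =====
-- def deshacer_abajo(tablero, x, y, xf, yf, turno, dimension):
--     while 0 <= x < dimension: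
--         if y != yf or xf - 1 <= x:
--             break
--         try:
--             tablero[x + 1][y] = -turno
--         except IndexError:
--             break
--         x += 1
--     return tablero
-- ===== Notes on version B (the rewrite author's own statement) =====
-- stated objective: simpler
-- what changed: Replaces the tail recursion (with its bare-except control flow) by a flat while loop over a mutable cursor that breaks on a failed guard or an out-of-range assignment.
import Mathlib
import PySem

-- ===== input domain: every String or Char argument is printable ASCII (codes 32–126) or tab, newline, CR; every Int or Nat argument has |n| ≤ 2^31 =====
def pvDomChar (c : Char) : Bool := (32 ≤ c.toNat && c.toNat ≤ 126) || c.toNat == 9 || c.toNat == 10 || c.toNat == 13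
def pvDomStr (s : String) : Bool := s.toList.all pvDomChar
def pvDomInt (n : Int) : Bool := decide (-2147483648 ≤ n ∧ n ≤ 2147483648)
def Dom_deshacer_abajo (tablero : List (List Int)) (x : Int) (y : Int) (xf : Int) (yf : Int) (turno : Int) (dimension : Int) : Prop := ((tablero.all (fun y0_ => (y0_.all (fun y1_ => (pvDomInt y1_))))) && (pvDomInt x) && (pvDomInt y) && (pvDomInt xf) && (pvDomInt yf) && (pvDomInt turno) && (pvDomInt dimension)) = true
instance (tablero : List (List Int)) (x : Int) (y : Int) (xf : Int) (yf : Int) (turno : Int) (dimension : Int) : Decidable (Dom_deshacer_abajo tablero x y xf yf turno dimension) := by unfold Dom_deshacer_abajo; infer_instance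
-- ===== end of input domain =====

-- B turns A's tail recursion (with its bare-except control flow) into a flat while loop
-- over a mutable cursor (objective: simpler — no recursion, constant stack).
-- Python A mutates `tablero` in place; B performs the same mutations in the same order,
-- so the proved return-value equivalence also covers the observable side effect.

-- ===== PORT A =====
-- the try body: tablero[x+1][y] = turno*-1; the bare except swallows the IndexError
def deshacer_abajo (tablero : List (List Int)) (x : Int) (y : Int) (xf : Int) (yf : Int) (turno : Int) (dimension : Int) : List (List Int) :=
  if 0 ≤ x ∧ x < dimension then
    if y = yf ∧ xf - 1 > x then
      match PySem.List.pyGet? tablero (x + 1) with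
      | none => tablero                         -- IndexError on the row → except → return tablero
      | some row =>
        match PySem.List.pySet? row y (turno * -1) with
        | none => tablero                       -- IndexError on the cell → except → return tablero
        | some row' =>
          deshacer_abajo (PySem.List.pySetD tablero (x + 1) row') (x + 1) y xf yf turno dimension
    else tablero
  else tablero
termination_by (dimension - x).toNat
decreasing_by omega

-- ===== PORT B =====
-- try: tablero[x+1][y] = -turno — the assigned board, or none on IndexError
def pvAssign? (t : List (List Int)) (i y v : Int) : Option (List (List Int)) :=
  (PySem.List.pyGet? t i).bind fun row =>
    (PySem.List.pySet? row y v).map fun row' => PySem.List.pySetD t i row'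

-- B's while loop, fuel-driven; each arm returning the board is a `break` (or the loop test failing)
def pvWhileB (y xf yf turno dimension : Int) : Nat → Int → List (List Int) → List (List Int)
  | 0, _, t => t
  | fuel + 1, x, t =>
    if ¬ (0 ≤ x ∧ x < dimension) then t         -- while test fails
    else if y ≠ yf ∨ xf - 1 ≤ x then t          -- break
    else
      match pvAssign? t (x + 1) y (-turno) with
      | none => t                               -- except IndexError: break
      | some t' => pvWhileB y xf yf turno dimension fuel (x + 1) t'

def deshacer_abajo_alt (tablero : List (List Int)) (x : Int) (y : Int) (xf : Int) (yf : Int) (turno : Int) (dimension : Int) : List (List Int) :=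
  pvWhileB y xf yf turno dimension ((dimension - x).toNat + 1) x tablero

-- ===== PRECONDITION & SPEC =====
def Spec_deshacer_abajo (tablero : List (List Int)) (x : Int) (y : Int) (xf : Int) (yf : Int) (turno : Int) (dimension : Int) (out : List (List Int)) : Prop := out = deshacer_abajo_alt tablero x y xf yf turno dimension
instance (tablero : List (List Int)) (x : Int) (y : Int) (xf : Int) (yf : Int) (turno : Int) (dimension : Int) (out : List (List Int)) : Decidable (Spec_deshacer_abajo tablero x y xf yf turno dimension out) := by unfold Spec_deshacer_abajo; infer_instance

-- ===== CLAIM =====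
def Claim_equal_deshacer_abajo : Prop := ∀ (tablero : List (List Int)) (x : Int) (y : Int) (xf : Int) (yf : Int) (turno : Int) (dimension : Int), Dom_deshacer_abajo tablero x y xf yf turno dimension → Spec_deshacer_abajo tablero x y xf yf turno dimension (deshacer_abajo tablero x y xf yf turno dimension)

-- ===== LEMMAS AND PROOFS =====

-- A's recursion equals B's fuel-driven loop whenever the fuel dominates the cursor distance.
theorem pvStep (y xf yf turno dimension : Int) :
    ∀ (fuel : Nat) (x : Int) (t : List (List Int)),
      (dimension - x).toNat < fuel →
      deshacer_abajo t x y xf yf turno dimension =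
        pvWhileB y xf yf turno dimension fuel x t := by
  intro fuel
  induction fuel with
  | zero => intro x t h; omega
  | succ n ih =>
    intro x t h
    unfold deshacer_abajo pvWhileB
    by_cases h1 : 0 ≤ x ∧ x < dimension
    · rw [if_neg (not_not_intro h1), if_pos h1]
      by_cases h2 : y = yf ∧ xf - 1 > x
      · have h2' : ¬ (y ≠ yf ∨ xf - 1 ≤ x) := by
          push_neg; exact ⟨h2.1, by omega⟩
        rw [if_neg h2', if_pos h2]
        unfold pvAssign?
        cases hget : PySem.List.pyGet? t (x + 1) with
        | none => simp
        | some row =>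
          simp only [Option.bind_some]
          cases hset : PySem.List.pySet? row y (turno * -1) with
          | none =>
            have : PySem.List.pySet? row y (-turno) = none := by
              rw [show -turno = turno * -1 by ring]; exact hset
            simp [this]
          | some row' =>
            have : PySem.List.pySet? row y (-turno) = some row' := by
              rw [show -turno = turno * -1 by ring]; exact hset
            simp only [this, Option.map_some]
            exact ih (x + 1) _ (by omega)
      · rcases not_and_or.mp h2 with hy | hx
        · rw [if_pos (Or.inl hy), if_neg h2]
        · rw [if_pos (Or.inr (show xf - 1 ≤ x by omega)), if_neg h2]
    · rw [if_neg h1, if_pos h1]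

-- ===== VERDICT =====
theorem deshacer_abajo_spec : Claim_equal_deshacer_abajo := by
  intro tablero x y xf yf turno dimension _
  unfold Spec_deshacer_abajo deshacer_abajo_alt
  exact pvStep y xf yf turno dimension _ x tablero (by omega)
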